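-- pv_equiv track=rewrite | github.com/nastyh/LeetCode | Basic Data Structures/max_balanced_subsequence_score.py | MaxBalancedSubsequenceScore
-- ===== SOURCE A (Python) =====
-- def MaxBalancedSubsequenceScore(n, stockPrice):
--     """
--     O(n) both
--     Store the difference between the stock price and the index for each element in diff.
--     Store cumulative stock prices for each unique difference between stock prices and their positions.
--     update the dict find the maximum cumulative stock price among all the balanced subsequences.
--     Update the maxm variable if it finds a higher cumulative stock price.
--     return maxm
--     """
--     # Create a dictionary to store
--     # the difference and cumulative stock prices
--     mp = {}
--     maxm = 0
--     for i in range(n):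
--         # Calculate the difference
--         #  between stock price and index
--         diff = stockPrice[i] - i
--
--         # Add the stock price to
--         #  the corresponding difference
--         if diff in mp:
--             mp[diff] += stockPrice[i]
--         else:
--             mp[diff] = stockPrice[i]
--
--     # Find the maximum score
--     #  by iterating through the dictionary
--     for key, value in mp.items():
--         if value > maxm:
--             # Update the maximum score
--             #  if a higher score is found
--             maxm = value
--
--     # Return the maximum score
--     return maxm
-- ===== SOURCE B (Python) =====
-- def MaxBalancedSubsequenceScore(n, stockPrice):
--     # Dict-free: list the (diff, price) pairs once, then for each distinct diff
--     # (in sorted order) sum its group's prices by a direct scan.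
--     pairs = [(stockPrice[i] - i, stockPrice[i]) for i in range(n)]
--     best = 0
--     for d in sorted(set(e for e, _ in pairs)):
--         s = sum(q for e, q in pairs if e == d)
--         if s > best:
--             best = s
--     return best
-- ===== Notes on version B (the rewrite author's own statement) =====
-- stated objective: alternative
-- what changed: Replaced the hash-map accumulation pass with a dict-free scheme: build the (diff, price) pair list once, take the sorted distinct diffs, and compute each group's sum by a direct scan over the pairs, keeping the running max with its 0 floor.
import Mathlib
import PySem

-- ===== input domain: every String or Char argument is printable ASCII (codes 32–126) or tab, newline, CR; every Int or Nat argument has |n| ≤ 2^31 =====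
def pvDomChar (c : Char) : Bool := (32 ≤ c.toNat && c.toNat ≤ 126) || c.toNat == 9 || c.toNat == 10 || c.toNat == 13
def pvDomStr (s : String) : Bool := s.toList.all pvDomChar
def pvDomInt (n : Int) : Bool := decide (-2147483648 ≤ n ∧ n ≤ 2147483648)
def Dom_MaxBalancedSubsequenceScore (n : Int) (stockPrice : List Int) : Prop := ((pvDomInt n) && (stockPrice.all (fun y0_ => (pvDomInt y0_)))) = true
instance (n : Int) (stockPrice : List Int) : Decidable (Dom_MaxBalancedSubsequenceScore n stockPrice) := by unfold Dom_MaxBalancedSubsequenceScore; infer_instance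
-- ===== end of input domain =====

-- B replaces A's dict accumulation with a dict-free pair list + per-distinct-diff scan (alternative decomposition, not faster).

-- ===== PORT A =====
def MaxBalancedSubsequenceScore (n : Int) (stockPrice : List Int) : Int :=
  let mp := (PySem.List.pyRange 0 n 1).foldl (fun mp i =>
    let diff := PySem.List.pyGetD stockPrice i 0 - i
    if mp.contains diff then
      mp.insert diff (mp.getD diff 0 + PySem.List.pyGetD stockPrice i 0)
    else
      mp.insert diff (PySem.List.pyGetD stockPrice i 0)) PySem.Dict.empty
  mp.items.foldl (fun maxm kv => if kv.2 > maxm then kv.2 else maxm) 0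

-- ===== PORT B =====
def MaxBalancedSubsequenceScore_alt (n : Int) (stockPrice : List Int) : Int :=
  let pairs := (PySem.List.pyRange 0 n 1).map
    (fun i => (PySem.List.pyGetD stockPrice i 0 - i, PySem.List.pyGetD stockPrice i 0))
  (PySem.List.sorted (PySem.Set.ofList (pairs.map (fun e => e.1))) (fun x => x) false).foldl
    (fun best d =>
      let s := ((pairs.filter (fun e => e.1 == d)).map (fun e => e.2)).sum
      if s > best then s else best) 0

-- ===== PRECONDITION & SPEC =====
-- Pre_ excludes exactly the inputs where A raises IndexError: n beyond the list's length.
def Pre_MaxBalancedSubsequenceScore (n : Int) (stockPrice : List Int) : Prop :=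
  n ≤ (stockPrice.length : Int)
instance (n : Int) (stockPrice : List Int) : Decidable (Pre_MaxBalancedSubsequenceScore n stockPrice) := by unfold Pre_MaxBalancedSubsequenceScore; infer_instance
def pvWitness_MaxBalancedSubsequenceScore : Int × List Int := (2, [5, 3])
def Spec_MaxBalancedSubsequenceScore (n : Int) (stockPrice : List Int) (out : Int) : Prop := out = MaxBalancedSubsequenceScore_alt n stockPrice
instance (n : Int) (stockPrice : List Int) (out : Int) : Decidable (Spec_MaxBalancedSubsequenceScore n stockPrice out) := by unfold Spec_MaxBalancedSubsequenceScore; infer_instance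

-- ===== CLAIM (what is proved, stated in full; the proofs are below) =====
def Claim_equal_MaxBalancedSubsequenceScore : Prop := ∀ (n : Int) (stockPrice : List Int), Dom_MaxBalancedSubsequenceScore n stockPrice → Pre_MaxBalancedSubsequenceScore n stockPrice → Spec_MaxBalancedSubsequenceScore n stockPrice (MaxBalancedSubsequenceScore n stockPrice)

-- ===== LEMMAS AND PROOFS =====

-- A's two-branch dict update is the single insert-with-getD step.
theorem pvStepEq (sp : List Int) :
    (fun (mp : PySem.Dict Int Int) (i : Int) =>
      let diff := PySem.List.pyGetD sp i 0 - i
      if mp.contains diff then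
        mp.insert diff (mp.getD diff 0 + PySem.List.pyGetD sp i 0)
      else
        mp.insert diff (PySem.List.pyGetD sp i 0))
    = (fun (mp : PySem.Dict Int Int) (i : Int) =>
      mp.insert (PySem.List.pyGetD sp i 0 - i)
        (mp.getD (PySem.List.pyGetD sp i 0 - i) 0 + PySem.List.pyGetD sp i 0)) := by
  funext mp i
  simp only []
  split
  · rfl
  · rename_i h
    rw [PySem.Dict.getD_of_not_contains _ _ (by simpa using h), zero_add]

-- getD of an insert-accumulate fold is the filtered sum.
theorem pvGetDFold (key val : Int → Int) (l : List Int) (d : PySem.Dict Int Int) (c : Int) :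
    (l.foldl (fun mp i => mp.insert (key i) (mp.getD (key i) 0 + val i)) d).getD c 0
    = d.getD c 0 + ((l.filter (fun i => key i == c)).map val).sum := by
  induction l generalizing d with
  | nil => simp
  | cons x xs ih =>
    simp only [List.foldl_cons, ih, List.filter_cons]
    by_cases hx : key x = c
    · simp [hx, PySem.Dict.getD_insert_self]
      ring
    · rw [PySem.Dict.getD_insert_of_ne _ _ _ (fun h => hx h.symm)]
      simp [hx]

-- the max-update fold step is right-commutative, so the fold is permutation-invariant
theorem pvMaxStepComm : ∀ (m a b : Int),
    (if (if m < a then a else m) < b then b else (if m < a then a else m))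
    = (if (if m < b then b else m) < a then a else (if m < b then b else m)) := by
  intro m a b; split_ifs <;> omega

theorem pvFoldMaxPerm {l₁ l₂ : List Int} (h : l₁.Perm l₂) (init : Int) :
    l₁.foldl (fun m v => if m < v then v else m) init
    = l₂.foldl (fun m v => if m < v then v else m) init := by
  exact List.Perm.foldl_eq (rcomm := ⟨fun m a b => pvMaxStepComm m a b⟩) h init

-- ===== VERDICT (by name: the statement is the Claim_ definition above) =====
theorem MaxBalancedSubsequenceScore_spec : Claim_equal_MaxBalancedSubsequenceScore := by
  intro n sp _ _
  unfold Spec_MaxBalancedSubsequenceScore MaxBalancedSubsequenceScore MaxBalancedSubsequenceScore_alt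
  rw [pvStepEq sp]
  simp only [gt_iff_lt]
  set k : Int → Int := fun i => PySem.List.pyGetD sp i 0 - i with hk
  set p : Int → Int := fun i => PySem.List.pyGetD sp i 0 with hp
  set L := PySem.List.pyRange 0 n 1 with hL
  set mp := L.foldl (fun mp i => mp.insert (k i) (mp.getD (k i) 0 + p i)) PySem.Dict.empty with hmp
  have hnd : mp.keys.Nodup := PySem.Dict.nodup_keys_foldl_insert_key L k _ _ (by simp)
  rw [PySem.Dict.items_eq_map_keys mp hnd 0]
  have hkeys : mp.keys = PySem.Set.ofList (L.map k) := by
    rw [hmp, PySem.Dict.keys_foldl_insert_key, PySem.Dict.keys_empty, PySem.Set.ofList_eq_foldl]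
    rfl
  have hgetD : ∀ c, mp.getD c 0 = ((L.filter (fun i => k i == c)).map p).sum := by
    intro c
    rw [hmp, pvGetDFold k p L PySem.Dict.empty c, PySem.Dict.getD_empty, zero_add]
  rw [List.foldl_map]
  simp only [hgetD, hkeys]
  simp only [List.map_map, List.filter_map, Function.comp_def]
  have hfin := pvFoldMaxPerm
    (((PySem.List.sorted_perm (PySem.Set.ofList (List.map k L)) (fun x => x) false).map
      (fun c => (List.map p (List.filter (fun i => k i == c) L)).sum)).symm) 0
  rw [List.foldl_map, List.foldl_map] at hfin
  exact hfin
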